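-- pv_equiv track=rewrite | github.com/dperki02/ai-tetris-analytics | ai_agent.py | column_heights
-- ===== SOURCE A (Python) =====
-- from typing import List, Tuple, Optional
--
-- def column_heights(board: List[List[int]]) -> List[int]:
--     height = len(board)
--     width = len(board[0])
--     heights = [0] * width
--     for x in range(width):
--         for y in range(height):
--             if board[y][x]:
--                 heights[x] = height - y
--                 break
--     return heights
-- ===== SOURCE B (Python) =====
-- def column_heights(board):
--     height = len(board)
--     width = len(board[0])
--     heights = [0] * width
--     for y, row in enumerate(board):
--         for x in range(width):
--             if row[x] and heights[x] == 0:
--                 heights[x] = height - y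
--     return heights
-- ===== Notes on version B (the rewrite author's own statement) =====
-- stated objective: alternative
-- what changed: B scans the board row-major (rows outer, columns inner), resolving each column at the first filled cell seen and keeping already-resolved columns fixed via the 0 sentinel, instead of A's per-column scan with break; Pre_ excludes ragged boards, where A may return only because break skips a short row while B's full row-major scan raises.
-- outside the precondition, e.g. on column_heights([[1, 129], [72, 1], [1, 0, 1], []]): A returns [4, 4], B raises IndexError
import Mathlib
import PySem

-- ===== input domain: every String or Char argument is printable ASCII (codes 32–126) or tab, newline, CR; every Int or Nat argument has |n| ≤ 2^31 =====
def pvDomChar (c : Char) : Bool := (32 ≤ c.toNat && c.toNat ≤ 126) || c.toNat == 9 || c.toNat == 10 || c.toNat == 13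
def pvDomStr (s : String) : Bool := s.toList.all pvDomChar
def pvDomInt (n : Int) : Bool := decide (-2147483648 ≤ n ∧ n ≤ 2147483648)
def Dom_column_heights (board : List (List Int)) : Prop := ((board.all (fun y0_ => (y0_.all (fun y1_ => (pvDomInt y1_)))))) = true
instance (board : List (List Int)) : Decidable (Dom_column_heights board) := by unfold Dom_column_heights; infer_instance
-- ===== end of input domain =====

-- B scans the board row-major (rows outer, columns inner) resolving each column at the
-- first filled cell, instead of A's per-column scan with break; return values agree on Pre_.

-- ===== PORT A =====
-- inner loop of A: 'for y in range(height): if board[y][x]: heights[x] = height - y; break'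
def colTopA (rows : List (List Int)) (height : Int) (y : Nat) (x : Nat) : Int :=
  match rows with
  | [] => 0
  | r :: rs =>
      if PySem.List.pyGetD r (x : Int) 0 ≠ 0 then height - (y : Int)
      else colTopA rs height (y + 1) x

def column_heights (board : List (List Int)) : List Int :=
  let height : Int := board.length
  let width : Nat := (board.headD []).length
  (List.range width).map (fun x => colTopA board height 0 x)

-- ===== PORT B =====
-- inner loop of B: 'for x in range(width): if row[x] and heights[x] == 0: heights[x] = height - y'
def rowStepB (height : Int) (width : Nat) (hs : List Int) (row : List Int) (y : Nat) : List Int :=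
  (List.range width).foldl
    (fun hs (x : Nat) =>
      if PySem.List.pyGetD row (x : Int) 0 ≠ 0 ∧ hs.getD x 0 = 0 then hs.set x (height - (y : Int))
      else hs) hs

def column_heights_alt (board : List (List Int)) : List Int :=
  let height : Int := board.length
  let width : Nat := (board.headD []).length
  board.zipIdx.foldl (fun hs p => rowStepB height width hs p.1 p.2) (List.replicate width 0)

-- ===== PRECONDITION & SPEC =====
-- Pre_ excludes the empty board (A raises IndexError on board[0]) and ragged boards with a
-- row shorter than the first row: there A raises IndexError unless its per-column break
-- happens to skip the short row, while B's full row-major scan always raises IndexError.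
def Pre_column_heights (board : List (List Int)) : Prop :=
  board ≠ [] ∧ ∀ row ∈ board, (board.headD []).length ≤ row.length
instance (board : List (List Int)) : Decidable (Pre_column_heights board) := by
  unfold Pre_column_heights; infer_instance

def pvWitness_column_heights : List (List Int) := [[1, 0], [0, 1]]

def Spec_column_heights (board : List (List Int)) (out : List Int) : Prop := out = column_heights_alt board
instance (board : List (List Int)) (out : List Int) : Decidable (Spec_column_heights board out) := by unfold Spec_column_heights; infer_instance

-- ===== CLAIM (what is proved, stated in full; the proofs are below) =====
def Claim_equal_column_heights : Prop := ∀ (board : List (List Int)), Dom_column_heights board → Pre_column_heights board → Spec_column_heights board (column_heights board)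

-- ===== LEMMAS AND PROOFS =====

-- the inner fold of B preserves the length of the heights list
lemma foldl_if_set_length (row : List Int) (v : Int) :
    ∀ (l : List Nat) (hs : List Int),
      (l.foldl (fun hs (x : Nat) =>
        if PySem.List.pyGetD row (x : Int) 0 ≠ 0 ∧ hs.getD x 0 = 0 then hs.set x v else hs) hs).length
      = hs.length := by
  intro l
  induction l with
  | nil => intro hs; rfl
  | cons a l ih =>
      intro hs
      simp only [List.foldl_cons]
      rw [ih]
      split <;> simp

lemma rowStepB_length (height : Int) (width : Nat) (hs row : List Int) (y : Nat) :
    (rowStepB height width hs row y).length = hs.length := by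
  unfold rowStepB
  exact foldl_if_set_length row _ (List.range width) hs

-- pointwise characterisation of one inner fold of B: index j becomes height - y exactly
-- when row[j] is filled and j was still unresolved; other indices are untouched
lemma rowStepB_getD (height : Int) (row : List Int) (y : Nat) :
    ∀ (n : Nat) (hs : List Int), n ≤ hs.length → ∀ j : Nat,
      ((List.range n).foldl
        (fun hs (x : Nat) =>
          if PySem.List.pyGetD row (x : Int) 0 ≠ 0 ∧ hs.getD x 0 = 0 then hs.set x (height - (y : Int))
          else hs) hs).getD j 0
      = if j < n ∧ PySem.List.pyGetD row (j : Int) 0 ≠ 0 ∧ hs.getD j 0 = 0 then height - (y : Int)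
        else hs.getD j 0 := by
  intro n
  induction n with
  | zero => intro hs _ j; simp
  | succ n ih =>
      intro hs hlen j
      rw [List.range_succ, List.foldl_append, List.foldl_cons, List.foldl_nil]
      have hlen' : n ≤ hs.length := Nat.le_of_succ_le hlen
      have hn := ih hs hlen' n
      simp only [Nat.lt_irrefl, false_and, if_false] at hn
      have hflen : ((List.range n).foldl
          (fun hs (x : Nat) =>
            if PySem.List.pyGetD row (x : Int) 0 ≠ 0 ∧ hs.getD x 0 = 0 then hs.set x (height - (y : Int))
            else hs) hs).length = hs.length :=
        foldl_if_set_length row _ (List.range n) hs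
      by_cases hcond : PySem.List.pyGetD row (n : Int) 0 ≠ 0 ∧ hs.getD n 0 = 0
      · rw [if_pos (by rw [hn]; exact hcond)]
        by_cases hj : j = n
        · subst hj
          rw [List.getD_eq_getElem?_getD, List.getElem?_set_self (by omega), Option.getD_some]
          rw [if_pos ⟨Nat.lt_succ_self j, hcond⟩]
        · rw [List.getD_eq_getElem?_getD, List.getElem?_set_ne (by omega),
              ← List.getD_eq_getElem?_getD, ih hs hlen' j]
          have : (j < n + 1 ∧ PySem.List.pyGetD row (j : Int) 0 ≠ 0 ∧ hs.getD j 0 = 0)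
               ↔ (j < n ∧ PySem.List.pyGetD row (j : Int) 0 ≠ 0 ∧ hs.getD j 0 = 0) := by
            constructor
            · rintro ⟨h1, h2⟩; exact ⟨by omega, h2⟩
            · rintro ⟨h1, h2⟩; exact ⟨by omega, h2⟩
          rw [if_congr this rfl rfl]
      · rw [if_neg (by rw [hn]; exact hcond)]
        rw [ih hs hlen' j]
        by_cases hj : j = n
        · subst hj
          rw [if_neg (by omega), if_neg (by rintro ⟨_, h2⟩; exact hcond h2)]
        · have : (j < n + 1 ∧ PySem.List.pyGetD row (j : Int) 0 ≠ 0 ∧ hs.getD j 0 = 0)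
               ↔ (j < n ∧ PySem.List.pyGetD row (j : Int) 0 ≠ 0 ∧ hs.getD j 0 = 0) := by
            constructor
            · rintro ⟨h1, h2⟩; exact ⟨by omega, h2⟩
            · rintro ⟨h1, h2⟩; exact ⟨by omega, h2⟩
          rw [if_congr this rfl rfl]

-- outer fold of B: once a column holds a nonzero value it keeps it; a still-zero column
-- ends up with A's per-column answer colTopA over the remaining rows
lemma outerB_getD (height : Int) (width : Nat) :
    ∀ (rows : List (List Int)) (y : Nat) (hs : List Int), hs.length = width →
      (y : Int) + rows.length ≤ height →
      ((rows.zipIdx y).foldl (fun hs p => rowStepB height width hs p.1 p.2) hs).length = width ∧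
      ∀ j : Nat, j < width →
        ((rows.zipIdx y).foldl (fun hs p => rowStepB height width hs p.1 p.2) hs).getD j 0
        = if hs.getD j 0 = 0 then colTopA rows height y j else hs.getD j 0 := by
  intro rows
  induction rows with
  | nil =>
      intro y hs hlen _
      refine ⟨by simpa using hlen, ?_⟩
      intro j hj
      simp only [List.zipIdx_nil, List.foldl_nil, colTopA]
      by_cases h0 : hs.getD j 0 = 0
      · rw [if_pos h0, h0]
      · rw [if_neg h0]
  | cons r rs ih =>
      intro y hs hlen hht
      rw [List.zipIdx_cons, List.foldl_cons]
      have hlen' : (rowStepB height width hs r y).length = width := by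
        rw [rowStepB_length]; exact hlen
      have hht' : ((y + 1 : Nat) : Int) + rs.length ≤ height := by
        simp only [List.length_cons] at hht; push_cast at hht ⊢; omega
      obtain ⟨ihlen, ihget⟩ := ih (y + 1) (rowStepB height width hs r y) hlen' hht'
      refine ⟨ihlen, ?_⟩
      intro j hj
      rw [ihget j hj]
      have hstep : (rowStepB height width hs r y).getD j 0
          = if j < width ∧ PySem.List.pyGetD r (j : Int) 0 ≠ 0 ∧ hs.getD j 0 = 0 then height - (y : Int)
            else hs.getD j 0 := rowStepB_getD height r y width hs (by omega) j
      have hy : (y : Int) < height := by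
        simp only [List.length_cons] at hht; push_cast at hht; omega
      by_cases h0 : hs.getD j 0 = 0
      · by_cases hhit : PySem.List.pyGetD r (j : Int) 0 ≠ 0
        · have hv : (rowStepB height width hs r y).getD j 0 = height - (y : Int) := by
            rw [hstep]; exact if_pos ⟨hj, hhit, h0⟩
          rw [hv, if_neg (by omega : ¬(height - (y : Int) = 0)), if_pos h0]
          simp only [colTopA]
          rw [if_pos hhit]
        · have hv : (rowStepB height width hs r y).getD j 0 = 0 := by
            rw [hstep]
            rw [if_neg (show ¬(j < width ∧ PySem.List.pyGetD r (j : Int) 0 ≠ 0 ∧ hs.getD j 0 = 0) by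
              rintro ⟨_, h2, _⟩; exact hhit h2)]
            exact h0
          rw [hv, if_pos rfl, if_pos h0]
          simp only [colTopA]
          rw [if_neg hhit]
      · have hv : (rowStepB height width hs r y).getD j 0 = hs.getD j 0 := by
          rw [hstep]
          exact if_neg (by rintro ⟨_, _, h3⟩; exact h0 h3)
        rw [hv, if_neg h0, if_neg h0]

-- ===== VERDICT (by name: the statement is the Claim_ definition above) =====
theorem column_heights_spec : Claim_equal_column_heights := by
  intro board _ _
  unfold Spec_column_heights column_heights column_heights_alt
  dsimp only
  obtain ⟨hlen, hget⟩ := outerB_getD ((board.length : Nat) : Int) (board.headD []).length board 0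
    (List.replicate (board.headD []).length 0) (by simp) (by simp)
  apply List.ext_getElem
  · simp only [List.length_map, List.length_range]
    exact hlen.symm
  · intro j hj1 hj2
    rw [List.getElem_map, List.getElem_range]
    have hjw : j < (board.headD []).length := by simpa using hj1
    have hthis := hget j hjw
    have hrep : (List.replicate (board.headD []).length (0 : Int)).getD j 0 = 0 := by
      simp only [List.getD_eq_getElem?_getD, List.getElem?_replicate]
      split <;> rfl
    rw [hrep, if_pos rfl] at hthis
    rw [← List.getD_eq_getElem _ 0 hj2]
    exact hthis.symm
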